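-- pv_equiv track=rewrite | github.com/topliceanu/learn | interview/chainlink/problems.py | solution
-- ===== SOURCE A (Python) =====
-- def solution(prices):
--     if len(prices) == 0:
--         return 0
--     # We are always paying the first price.
--     total = prices[0]
--     min_price = prices[0]
--     for i in range(1, len(prices)):
--         if prices[i] > min_price:
--             total += prices[i] - min_price
--         if prices[i] < min_price:
--             min_price = prices[i]
--     return total
-- ===== SOURCE B (Python) =====
-- def solution(prices):
--     if not prices:
--         return 0
--     mins = []
--     m = prices[0]
--     for p in prices:
--         m = min(m, p)
--         mins.append(m)
--     return prices[0] + sum(p - m for p, m in zip(prices, mins))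
-- ===== Notes on version B (the rewrite author's own statement) =====
-- stated objective: idiomatic
-- what changed: Replaces the branching running-min accumulator with a prefix-minimum list and a branchless sum of p - prefix_min over all positions (zero exactly where A adds nothing).
import Mathlib
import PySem

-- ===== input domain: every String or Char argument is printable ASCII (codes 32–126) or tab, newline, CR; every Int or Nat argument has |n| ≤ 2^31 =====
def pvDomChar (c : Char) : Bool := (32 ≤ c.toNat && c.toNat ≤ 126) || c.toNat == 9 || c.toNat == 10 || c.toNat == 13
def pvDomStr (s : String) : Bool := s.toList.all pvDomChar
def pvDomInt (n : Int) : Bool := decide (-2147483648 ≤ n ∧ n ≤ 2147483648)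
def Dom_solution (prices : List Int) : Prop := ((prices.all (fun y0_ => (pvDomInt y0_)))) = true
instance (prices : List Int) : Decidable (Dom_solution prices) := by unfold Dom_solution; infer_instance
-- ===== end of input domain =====

-- B replaces A's branching running-min accumulator by a prefix-minimum list and a branchless sum; same O(n) cost, plainer shape.

-- ===== PORT A =====
def solution (prices : List Int) : Int :=
  if prices.length = 0 then 0
  else
    let p0 := PySem.List.pyGetD prices 0 0
    let st := (PySem.List.pyRange 1 (prices.length : Int) 1).foldl
      (fun (s : Int × Int) i =>
        let p := PySem.List.pyGetD prices i 0
        let s := if p > s.2 then (s.1 + (p - s.2), s.2) else s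
        if p < s.2 then (s.1, p) else s) (p0, p0)
    st.1

-- ===== PORT B =====
-- running minimums: accMins m xs = the prefix-min list of xs seeded with m
def accMins (m : Int) : List Int → List Int
  | [] => []
  | x :: xs => min m x :: accMins (min m x) xs

def solution_alt (prices : List Int) : Int :=
  match prices with
  | [] => 0
  | p0 :: _ => p0 + (List.zipWith (fun p m => p - m) prices (accMins p0 prices)).sum

-- ===== PRECONDITION & SPEC =====
def Spec_solution (prices : List Int) (out : Int) : Prop := out = solution_alt prices
instance (prices : List Int) (out : Int) : Decidable (Spec_solution prices out) := by unfold Spec_solution; infer_instance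

-- ===== CLAIM (what is proved, stated in full; the proofs are below) =====
def Claim_equal_solution : Prop := ∀ (prices : List Int), Dom_solution prices → Spec_solution prices (solution prices)

-- ===== LEMMAS AND PROOFS =====

-- A's loop body, uniformly: one step updates (t, m) to (t + (x - min m x), min m x)
theorem stepA_eq (s : Int × Int) (x : Int) :
    (let s' := if x > s.2 then (s.1 + (x - s.2), s.2) else s;
     if x < s'.2 then (s'.1, x) else s') = (s.1 + (x - min s.2 x), min s.2 x) := by
  rcases s with ⟨t, m⟩
  dsimp only
  by_cases h : x > m
  · have h2 : ¬ x < m := by omega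
    have hmin : min m x = m := by omega
    simp [h, h2, hmin]
  · by_cases h2 : x < m
    · have hmin : min m x = x := by omega
      simp [h, h2, hmin]
    · have hmin : min m x = m := by omega
      simp [h, h2, hmin]
      omega

theorem foldA_eq (xs : List Int) : ∀ (t m : Int),
    (xs.foldl
      (fun (s : Int × Int) x =>
        let s := if x > s.2 then (s.1 + (x - s.2), s.2) else s
        if x < s.2 then (s.1, x) else s) (t, m)) =
    (t + (List.zipWith (fun p q => p - q) xs (accMins m xs)).sum,
     (accMins m xs).getLastD m) := by
  induction xs with
  | nil => intro t m; simp [accMins]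
  | cons x xs ih =>
    intro t m
    simp only [List.foldl_cons, accMins, List.zipWith_cons_cons, List.sum_cons]
    rw [stepA_eq (t, m) x]
    rw [ih]
    simp only [Prod.mk.injEq, List.getLastD_cons]
    exact ⟨by ring, trivial⟩

theorem solution_spec : Claim_equal_solution := by
  unfold Claim_equal_solution Spec_solution
  intro prices _
  cases prices with
  | nil => simp [solution, solution_alt]
  | cons p0 rest =>
    unfold solution solution_alt
    simp only [List.length_cons]
    rw [if_neg (Nat.succ_ne_zero _)]
    have hfold := PySem.List.foldl_pyRange_pyGetD' (xs := p0 :: rest) (a := 1) (d := 0)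
      (f := fun (s : Int × Int) p =>
        let s := if p > s.2 then (s.1 + (p - s.2), s.2) else s
        if p < s.2 then (s.1, p) else s)
      (init := (PySem.List.pyGetD (p0 :: rest) 0 0, PySem.List.pyGetD (p0 :: rest) 0 0))
      (by norm_num)
    simp only [PySem.List.pyGetD_zero_cons, List.length_cons] at hfold ⊢
    rw [hfold]
    simp only [Int.toNat_one, List.drop_succ_cons, List.drop_zero]
    rw [foldA_eq rest p0 p0]
    simp [accMins]
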